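-- pv_equiv track=rewrite | github.com/GabyRebound/algoritmos_de_busqueda | matrizAdyacencia/controller/helpersVectProb.py | generateMatrixGeneral
-- ===== SOURCE A (Python) =====
-- def deleteWordsEmpty(word, WORD_EMPTY):
--     wordFinal = []
--     for i in word.lower().split(' '):
--         if not (i in WORD_EMPTY):
--             wordFinal.append(i)
--     return wordFinal
--
-- def generateMatrixGeneral(words, WORD_EMPTY):
--     matrix = {}
--     for DK, DN in words.items():
--         for word in deleteWordsEmpty(DN, WORD_EMPTY):
--             matrix[word] = {}
--
--     for DK, DN in words.items():
--         for word in deleteWordsEmpty(DN, WORD_EMPTY):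
--             matrix[word][DK] = 0
--
--     for DK, DN in words.items():
--         for word in deleteWordsEmpty(DN, WORD_EMPTY):
--             matrix[word][DK] += 1
--     return matrix
-- ===== SOURCE B (Python) =====
-- def generateMatrixGeneral(words, WORD_EMPTY):
--     matrix = {}
--     for DK, DN in words.items():
--         # phase 1: per-document frequency table over the filtered tokens
--         counts = {}
--         for w in DN.lower().split(' '):
--             if w not in WORD_EMPTY:
--                 counts[w] = counts.get(w, 0) + 1
--         # phase 2: merge the distinct words of this document into the matrix
--         for w, c in counts.items():
--             matrix.setdefault(w, {})[DK] = c
--     return matrix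
-- ===== Notes on version B (the rewrite author's own statement) =====
-- stated objective: faster
-- what changed: A makes three separate full passes over all documents, re-tokenizing every document three times and incrementing dict entries once per token occurrence; B makes a single pass that builds a per-document frequency table of the filtered tokens and then merges each distinct word's count into the matrix with setdefault.
import Mathlib
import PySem

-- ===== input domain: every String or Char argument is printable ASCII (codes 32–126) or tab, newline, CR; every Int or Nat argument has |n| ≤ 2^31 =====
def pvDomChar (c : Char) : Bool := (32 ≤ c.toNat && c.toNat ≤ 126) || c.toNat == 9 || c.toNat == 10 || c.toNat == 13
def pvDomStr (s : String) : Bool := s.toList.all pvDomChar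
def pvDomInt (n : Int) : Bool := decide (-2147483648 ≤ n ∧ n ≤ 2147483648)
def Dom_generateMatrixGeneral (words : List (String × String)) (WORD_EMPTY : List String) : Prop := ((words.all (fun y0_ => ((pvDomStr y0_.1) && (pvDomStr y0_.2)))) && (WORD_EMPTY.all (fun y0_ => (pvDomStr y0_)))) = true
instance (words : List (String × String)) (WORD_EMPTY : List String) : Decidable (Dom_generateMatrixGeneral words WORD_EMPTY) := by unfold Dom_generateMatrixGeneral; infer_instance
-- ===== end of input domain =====

-- B replaces A's three full passes over all documents by one pass that builds a per-document
-- frequency table and merges it into the matrix (measured constant-factor speedup in a timing run).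

-- ===== PORT A =====
-- split(' ') has a nonempty literal separator, so PySem.Str.split? is always `some`
def deleteWordsEmpty (word : String) (WORD_EMPTY : List String) : List String :=
  ((PySem.Str.split? (PySem.Str.lower word) " ").getD []).foldl
    (fun wordFinal i => if WORD_EMPTY.contains i then wordFinal else wordFinal ++ [i]) []

def generateMatrixGeneral (words : List (String × String)) (WORD_EMPTY : List String) : List (String × List (String × Int)) :=
  let m1 : PySem.Dict String (PySem.Dict String Int) :=
    words.foldl (fun m p => (deleteWordsEmpty p.2 WORD_EMPTY).foldl
      (fun m word => m.insert word PySem.Dict.empty) m) PySem.Dict.empty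
  -- matrix[word][DK] = 0 : `word` is always present here, so `modify` with default ∅ is exact
  let m2 : PySem.Dict String (PySem.Dict String Int) :=
    words.foldl (fun m p => (deleteWordsEmpty p.2 WORD_EMPTY).foldl
      (fun m word => m.modify word PySem.Dict.empty (fun inner => inner.insert p.1 0)) m) m1
  -- matrix[word][DK] += 1 : both keys always present here, so nested `modify` is exact
  let m3 : PySem.Dict String (PySem.Dict String Int) :=
    words.foldl (fun m p => (deleteWordsEmpty p.2 WORD_EMPTY).foldl
      (fun m word => m.modify word PySem.Dict.empty (fun inner => inner.modify p.1 0 (· + 1))) m) m2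
  m3.items.map (fun q => (q.1, q.2.items))

-- ===== PORT B =====
def generateMatrixGeneral_alt (words : List (String × String)) (WORD_EMPTY : List String) : List (String × List (String × Int)) :=
  (words.foldl (fun m p =>
      -- per-document frequency table over the filtered tokens
      let counts : PySem.Dict String Int :=
        ((PySem.Str.split? (PySem.Str.lower p.2) " ").getD []).foldl
          (fun c w => if WORD_EMPTY.contains w then c else c.insert w (c.getD w 0 + 1))
          PySem.Dict.empty
      -- matrix.setdefault(w, {})[DK] = c : `modify` with default ∅ is exactly setdefault-then-set
      counts.items.foldl
        (fun m q => m.modify q.1 PySem.Dict.empty (fun inner => inner.insert p.1 q.2)) m)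
    (PySem.Dict.empty : PySem.Dict String (PySem.Dict String Int))).items.map
    (fun q => (q.1, q.2.items))

-- ===== PRECONDITION & SPEC =====
-- words models a Python dict, whose keys are necessarily distinct: an association list with a
-- duplicated key represents no dict input at all, so those lists are outside the claim.
def Pre_generateMatrixGeneral (words : List (String × String)) (WORD_EMPTY : List String) : Prop :=
  (words.map Prod.fst).Nodup

instance (words : List (String × String)) (WORD_EMPTY : List String) : Decidable (Pre_generateMatrixGeneral words WORD_EMPTY) := by unfold Pre_generateMatrixGeneral; infer_instance

def pvWitness_generateMatrixGeneral : (List (String × String)) × List String :=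
  ([("d1", "a The a"), ("d2", "the b")], ["b"])

def Spec_generateMatrixGeneral (words : List (String × String)) (WORD_EMPTY : List String) (out : List (String × List (String × Int))) : Prop := out = generateMatrixGeneral_alt words WORD_EMPTY
instance (words : List (String × String)) (WORD_EMPTY : List String) (out : List (String × List (String × Int))) : Decidable (Spec_generateMatrixGeneral words WORD_EMPTY out) := by unfold Spec_generateMatrixGeneral; infer_instance

-- ===== CLAIM (what is proved, stated in full; the proofs are below) =====
def Claim_equal_generateMatrixGeneral : Prop := ∀ (words : List (String × String)) (WORD_EMPTY : List String), Dom_generateMatrixGeneral words WORD_EMPTY → Pre_generateMatrixGeneral words WORD_EMPTY → Spec_generateMatrixGeneral words WORD_EMPTY (generateMatrixGeneral words WORD_EMPTY)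

-- ===== LEMMAS AND PROOFS =====

-- ===== LEMMAS AND PROOFS =====
-- the filtered token list of one document
def pvTk (WE : List String) (p : String × String) : List String := deleteWordsEmpty p.2 WE

-- one copy of the document pair per occurrence of the word w in it
def pvOcc (WE : List String) (words : List (String × String)) (w : String) : List (String × String) :=
  words.flatMap (fun p => ((pvTk WE p).filter (fun x => x == w)).map (fun _ => p))

-- the documents containing w, in order
def pvDocs (WE : List String) (words : List (String × String)) (w : String) : List (String × String) :=
  words.filter (fun p => (pvTk WE p).contains w)

-- A's inner dict for word w
def pvVA (WE : List String) (words : List (String × String)) (w : String) : PySem.Dict String Int :=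
  (pvOcc WE words w).foldl (fun v p => v.modify p.1 0 (· + 1))
    ((pvOcc WE words w).foldl (fun v p => v.insert p.1 0) PySem.Dict.empty)

-- B's inner dict for word w
def pvVB (WE : List String) (words : List (String × String)) (w : String) : PySem.Dict String Int :=
  (pvDocs WE words w).foldl (fun v p => v.insert p.1 (((pvTk WE p).count w : Int))) PySem.Dict.empty

-- the outer key list both sides build
def pvKeys (WE : List String) (words : List (String × String)) : PySem.Set String :=
  words.foldl (fun s p => PySem.Set.update s (pvTk WE p)) []

-- A's three passes and B's one pass, written over pvTk / counter (definitionally equal to the ports)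
def pvA1 (WE : List String) (words : List (String × String)) : PySem.Dict String (PySem.Dict String Int) :=
  words.foldl (fun m p => (pvTk WE p).foldl (fun m word => m.insert word PySem.Dict.empty) m) PySem.Dict.empty

def pvA2 (WE : List String) (words : List (String × String)) : PySem.Dict String (PySem.Dict String Int) :=
  words.foldl (fun m p => (pvTk WE p).foldl (fun m word => m.modify word PySem.Dict.empty (fun inner => inner.insert p.1 0)) m) (pvA1 WE words)

def pvA3 (WE : List String) (words : List (String × String)) : PySem.Dict String (PySem.Dict String Int) :=
  words.foldl (fun m p => (pvTk WE p).foldl (fun m word => m.modify word PySem.Dict.empty (fun inner => inner.modify p.1 0 (· + 1))) m) (pvA2 WE words)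

def pvBd (WE : List String) (words : List (String × String)) : PySem.Dict String (PySem.Dict String Int) :=
  words.foldl (fun m p => (PySem.Dict.counter (pvTk WE p)).items.foldl
    (fun m q => m.modify q.1 PySem.Dict.empty (fun inner => inner.insert p.1 q.2)) m) PySem.Dict.empty

theorem pvA_eq (words : List (String × String)) (WE : List String) :
    generateMatrixGeneral words WE = (pvA3 WE words).items.map (fun q => (q.1, q.2.items)) := rfl

theorem pvDwe_filter (word : String) (WE : List String) :
    deleteWordsEmpty word WE
      = ((PySem.Str.split? (PySem.Str.lower word) " ").getD []).filter (fun i => !(WE.contains i)) := by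
  unfold deleteWordsEmpty
  have h : (fun (acc : List String) (i : String) => if WE.contains i then acc else acc ++ [i])
      = (fun (acc : List String) (i : String) => if (!(WE.contains i)) = true then acc ++ [id i] else acc) := by
    funext acc i
    cases hc : WE.contains i <;> simp [hc]
  rw [h, PySem.List.foldl_append_if]
  simp

theorem pvCounts_eq (WE : List String) (t : String) :
    ((PySem.Str.split? (PySem.Str.lower t) " ").getD []).foldl
        (fun c w => if WE.contains w then c else c.insert w (c.getD w 0 + 1)) PySem.Dict.empty
      = PySem.Dict.counter (deleteWordsEmpty t WE) := by
  rw [pvDwe_filter, ← PySem.Dict.foldl_insert_getD_add_one_eq_counter, List.foldl_filter]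
  have h : (fun (c : PySem.Dict String Int) (w : String) =>
        if (!(WE.contains w)) = true then c.insert w (c.getD w 0 + 1) else c)
      = (fun (c : PySem.Dict String Int) (w : String) =>
        if WE.contains w then c else c.insert w (c.getD w 0 + 1)) := by
    funext c w
    cases hc : WE.contains w <;> simp [hc]
  rw [h]

set_option maxHeartbeats 1000000 in
theorem pvB_eq (words : List (String × String)) (WE : List String) :
    generateMatrixGeneral_alt words WE = (pvBd WE words).items.map (fun q => (q.1, q.2.items)) := by
  unfold generateMatrixGeneral_alt pvBd
  have h : (fun (m : PySem.Dict String (PySem.Dict String Int)) (p : String × String) =>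
        ((((PySem.Str.split? (PySem.Str.lower p.2) " ").getD []).foldl
            (fun c w => if WE.contains w then c else c.insert w (c.getD w 0 + 1))
            PySem.Dict.empty).items).foldl
          (fun m q => m.modify q.1 PySem.Dict.empty (fun inner => inner.insert p.1 q.2)) m)
      = (fun (m : PySem.Dict String (PySem.Dict String Int)) (p : String × String) =>
        (PySem.Dict.counter (pvTk WE p)).items.foldl
          (fun m q => m.modify q.1 PySem.Dict.empty (fun inner => inner.insert p.1 q.2)) m) := by
    funext m p
    rw [pvCounts_eq]
    rfl
  rw [h]

-- generic dict extensionality from ordered keys + lookups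
theorem pvDictExt {v : Type} (d1 d2 : PySem.Dict String v) (dflt : v)
    (h1 : d1.keys.Nodup) (h2 : d2.keys.Nodup) (hk : d1.keys = d2.keys)
    (hg : ∀ k ∈ d1.keys, d1.getD k dflt = d2.getD k dflt) : d1 = d2 := by
  apply PySem.Dict.ext
  rw [PySem.Dict.items_eq_map_keys d1 h1 dflt, PySem.Dict.items_eq_map_keys d2 h2 dflt, ← hk]
  exact List.map_congr_left (fun k hkm => by rw [hg k hkm])

-- lookup after a keyed modify-loop: only the matching steps act, in order
theorem pvGetD_foldl_modify {v B : Type} (l : List B) (key : B → String) (d0 : v)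
    (f : B → v → v) (m : PySem.Dict String v) (w : String) :
    (l.foldl (fun m x => m.modify (key x) d0 (f x)) m).getD w d0
      = (l.filter (fun x => key x == w)).foldl (fun a x => f x a) (m.getD w d0) := by
  induction l generalizing m with
  | nil => simp
  | cons a l ih =>
    simp only [List.foldl_cons, List.filter_cons]
    by_cases h : key a = w
    · simp [h, ih, PySem.Dict.getD_modify]
    · have hb : (key a == w) = false := by simp [h]
      simp only [hb, Bool.false_eq_true, if_false, ih, PySem.Dict.getD_modify]
      rw [if_neg (fun hh => h hh.symm)]

theorem pvGetD_foldl_insert_empty (l : List String)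
    (m : PySem.Dict String (PySem.Dict String Int)) (w : String)
    (h : m.getD w PySem.Dict.empty = PySem.Dict.empty) :
    (l.foldl (fun m x => m.insert x PySem.Dict.empty) m).getD w PySem.Dict.empty = PySem.Dict.empty := by
  induction l generalizing m with
  | nil => simpa using h
  | cons a l ih =>
    simp only [List.foldl_cons]
    exact ih _ (by rw [PySem.Dict.getD_insert]; split <;> simp [h])

theorem pvGetD_foldl_insert_zero (l : List (String × String)) (v0 : PySem.Dict String Int)
    (DK : String) (h : v0.getD DK 0 = 0) :
    (l.foldl (fun a p => a.insert p.1 (0:Int)) v0).getD DK 0 = 0 := by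
  induction l generalizing v0 with
  | nil => simpa using h
  | cons a l ih =>
    simp only [List.foldl_cons]
    exact ih _ (by rw [PySem.Dict.getD_insert]; split <;> simp [h])

-- lookup after an insert-loop over pairwise distinct keys
theorem pvGetD_foldl_insert_key {B : Type} (l : List B) (key : B → String) (g : B → Int)
    (hnd : (l.map key).Nodup) (x : B) (hx : x ∈ l) :
    (l.foldl (fun a b => a.insert (key b) (g b)) PySem.Dict.empty).getD (key x) 0 = g x := by
  induction l using List.reverseRecOn with
  | nil => cases hx
  | append_singleton l b ih =>
    rw [List.foldl_append, List.foldl_cons, List.foldl_nil]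
    rcases List.mem_append.1 hx with hx' | hx'
    · have hne : key x ≠ key b := by
        simp only [List.map_append, List.nodup_append] at hnd
        intro he
        exact hnd.2.2 (key x) (List.mem_map_of_mem hx') (key b) (by simp) he
      rw [PySem.Dict.getD_insert, if_neg hne]
      exact ih (by simp only [List.map_append, List.nodup_append] at hnd; exact hnd.1) hx'
    · have hxb : x = b := by simpa using hx'
      subst hxb
      rw [PySem.Dict.getD_insert, if_pos rfl]

theorem pvFilterEqNodup (s : List String) (hnd : s.Nodup) (w : String) :
    s.filter (fun x => x == w) = if w ∈ s then [w] else [] := by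
  induction s with
  | nil => simp
  | cons a s ih =>
    rcases List.nodup_cons.1 hnd with ⟨ha, hs⟩
    simp only [List.filter_cons]
    by_cases h : a = w
    · subst h
      have hnil : s.filter (fun x => x == a) = [] :=
        List.filter_eq_nil_iff.2 (fun x hx hb => ha ((by simpa using hb) ▸ hx))
      simp [hnil]
    · have hb : (a == w) = false := by simp [h]
      simp only [hb, Bool.false_eq_true, if_false, ih hs]
      by_cases hw : w ∈ s <;> simp [hw, h, Ne.symm h]

theorem pvCounterItemsFilter (l : List String) (w : String) :
    ((PySem.Dict.counter l).items.filter (fun q => q.1 == w))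
      = if w ∈ l then [(w, (l.count w : Int))] else [] := by
  rw [PySem.Dict.items_counter, List.filter_map]
  have hc : ((PySem.Set.ofList l).filter ((fun (q : String × Int) => q.1 == w) ∘ (fun k => (k, (l.count k : Int)))))
      = (PySem.Set.ofList l).filter (fun x => x == w) := by
    rfl
  rw [hc, pvFilterEqNodup _ (PySem.Set.nodup_ofList l) w]
  by_cases hw : w ∈ l
  · rw [if_pos ((PySem.Set.mem_ofList _ _).2 hw), if_pos hw]
    simp
  · rw [if_neg (fun hm => hw ((PySem.Set.mem_ofList _ _).1 hm)), if_neg hw]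
    simp

theorem pvOcc_fst_sub (WE : List String) (words : List (String × String)) (w x : String)
    (h : x ∈ (pvOcc WE words w).map Prod.fst) : x ∈ words.map Prod.fst := by
  rcases List.mem_map.1 h with ⟨q, hq, rfl⟩
  rcases List.mem_flatMap.1 hq with ⟨p, hp, hq2⟩
  rcases List.mem_map.1 hq2 with ⟨_, _, rfl⟩
  exact List.mem_map_of_mem hp

theorem pvUpdate_of_subset (s : PySem.Set String) (l : List String) (h : ∀ x ∈ l, x ∈ s) :
    PySem.Set.update s l = s := by
  rw [PySem.Set.update_eq_append_filter]
  have hnil : (PySem.Set.ofList l).filter (fun y => !(PySem.Set.contains s y)) = [] :=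
    List.filter_eq_nil_iff.2 (fun y hy => by
      have hys := h y ((PySem.Set.mem_ofList _ _).1 hy)
      simpa using hys)
  rw [hnil, List.append_nil]

theorem pvUpdateOfList (s : PySem.Set String) (l : List String) :
    PySem.Set.update s (PySem.Set.ofList l) = PySem.Set.update s l := by
  rw [PySem.Set.update_eq_append_filter, PySem.Set.update_eq_append_filter, PySem.Set.ofList_ofList]

theorem pvOfListReplicate (n : Nat) (x : String) :
    PySem.Set.ofList (List.replicate n x) = if n = 0 then [] else [x] := by
  induction n with
  | zero => simp
  | succ k ih =>
    rw [List.replicate_succ', PySem.Set.ofList_append_singleton, ih]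
    by_cases hk : k = 0
    · simp [hk, PySem.Set.add]
    · simp only [hk, if_false]
      simp [PySem.Set.add_of_mem]

set_option maxHeartbeats 1000000 in
theorem pvOcc_ofList (WE : List String) (words : List (String × String)) (w : String)
    (hnd : (words.map Prod.fst).Nodup) :
    PySem.Set.ofList ((pvOcc WE words w).map Prod.fst) = (pvDocs WE words w).map Prod.fst := by
  induction words with
  | nil => simp [pvOcc, pvDocs]
  | cons p rest ih =>
    rw [List.map_cons] at hnd
    rcases List.nodup_cons.1 hnd with ⟨hp1, hrest⟩
    have hocc : pvOcc WE (p :: rest) w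
        = (((pvTk WE p).filter (fun x => x == w)).map (fun _ => p)) ++ pvOcc WE rest w := by
      simp [pvOcc]
    by_cases hw : w ∈ pvTk WE p
    · have hlen : ((pvTk WE p).filter (fun x => x == w)).length ≠ 0 := by
        simp only [ne_eq, List.length_eq_zero_iff, List.filter_eq_nil_iff]
        intro hall
        exact (hall w hw) (by simp)
      rw [hocc, List.map_append, PySem.Set.ofList_append, List.map_map]
      have hrep : ((pvTk WE p).filter (fun x => x == w)).map (Prod.fst ∘ (fun _ => p))
          = List.replicate ((pvTk WE p).filter (fun x => x == w)).length p.1 := by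
        simp [Function.comp_def, List.map_const']
      rw [hrep, pvOfListReplicate, if_neg hlen]
      rw [PySem.Set.update_eq_append_filter]
      have hfil : ((PySem.Set.ofList ((pvOcc WE rest w).map Prod.fst)).filter
            (fun y => !(PySem.Set.contains [p.1] y)))
          = PySem.Set.ofList ((pvOcc WE rest w).map Prod.fst) := by
        apply List.filter_eq_self.2
        intro y hy
        have hyr : y ∈ rest.map Prod.fst :=
          pvOcc_fst_sub WE rest w y ((PySem.Set.mem_ofList _ _).1 hy)
        have hne : y ≠ p.1 := fun he => hp1 (he ▸ hyr)
        simp [hne]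
      rw [hfil, ih hrest]
      simp [pvDocs, List.filter_cons, hw]
    · have hfil : (pvTk WE p).filter (fun x => x == w) = [] :=
        List.filter_eq_nil_iff.2 (fun x hx hb => hw ((by simpa using hb) ▸ hx))
      rw [hocc, hfil]
      simp only [List.map_nil, List.nil_append]
      rw [ih hrest]
      simp [pvDocs, List.filter_cons, hw]

set_option maxHeartbeats 1000000 in
theorem pvOcc_count (WE : List String) (words : List (String × String)) (w : String)
    (hnd : (words.map Prod.fst).Nodup) (p : String × String) (hp : p ∈ words)
    (hw : w ∈ pvTk WE p) :
    ((pvOcc WE words w).map Prod.fst).count p.1 = (pvTk WE p).count w := by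
  induction words with
  | nil => cases hp
  | cons q rest ih =>
    rw [List.map_cons] at hnd
    rcases List.nodup_cons.1 hnd with ⟨hq1, hrest⟩
    have hocc : (pvOcc WE (q :: rest) w).map Prod.fst
        = List.replicate ((pvTk WE q).filter (fun x => x == w)).length q.1
            ++ (pvOcc WE rest w).map Prod.fst := by
      simp [pvOcc, List.map_append, List.map_map, Function.comp, List.map_const']
    rw [hocc, List.count_append]
    rcases List.mem_cons.1 hp with rfl | hp'
    · have hzero : ((pvOcc WE rest w).map Prod.fst).count p.1 = 0 :=
        List.count_eq_zero.2 (fun hm => hq1 (pvOcc_fst_sub WE rest w p.1 hm))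
      rw [hzero, List.count_replicate, if_pos (by simp), List.count_eq_length_filter]
      omega
    · have hne : q.1 ≠ p.1 := fun he => hq1 (he ▸ List.mem_map_of_mem hp')
      rw [List.count_replicate, if_neg (by simpa using hne), ih hrest hp']
      simp

theorem pvKeys_mono (WE : List String) (words : List (String × String)) (s : PySem.Set String)
    (x : String) (h : x ∈ s) : x ∈ words.foldl (fun s p => PySem.Set.update s (pvTk WE p)) s := by
  induction words generalizing s with
  | nil => simpa using h
  | cons q rest ih =>
    simp only [List.foldl_cons]
    exact ih _ ((PySem.Set.mem_update _ _ _).2 (Or.inl h))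

theorem pvKeys_mem (WE : List String) (words : List (String × String)) (p : String × String)
    (hp : p ∈ words) (x : String) (hx : x ∈ pvTk WE p) (s : PySem.Set String) :
    x ∈ words.foldl (fun s p => PySem.Set.update s (pvTk WE p)) s := by
  induction words generalizing s with
  | nil => cases hp
  | cons q rest ih =>
    simp only [List.foldl_cons]
    rcases List.mem_cons.1 hp with rfl | hp'
    · exact pvKeys_mono WE rest _ x ((PySem.Set.mem_update _ _ _).2 (Or.inr hx))
    · exact ih hp' _

theorem pvStab (WE : List String) (words : List (String × String)) (s : PySem.Set String)
    (h : ∀ p ∈ words, ∀ x ∈ pvTk WE p, x ∈ s) :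
    words.foldl (fun s p => PySem.Set.update s (pvTk WE p)) s = s := by
  induction words with
  | nil => rfl
  | cons q rest ih =>
    simp only [List.foldl_cons]
    rw [pvUpdate_of_subset _ _ (h q List.mem_cons_self)]
    exact ih (fun p hp => h p (List.mem_cons_of_mem q hp))

-- ==== heavy ones under test ====
theorem pvFlattenStep {v : Type} (WE : List String) (words : List (String × String)) (w : String)
    (F : v → (String × String) → v) (v0 : v) :
    words.foldl (fun a p => (((pvTk WE p).filter (fun x => x == w)).foldl (fun a _ => F a p) a)) v0
      = (pvOcc WE words w).foldl F v0 := by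
  induction words generalizing v0 with
  | nil => rfl
  | cons p rest ih =>
    have hocc : pvOcc WE (p :: rest) w
        = (((pvTk WE p).filter (fun x => x == w)).map (fun _ => p)) ++ pvOcc WE rest w := by
      simp [pvOcc]
    rw [List.foldl_cons, ih, hocc, List.foldl_append, List.foldl_map]

set_option maxHeartbeats 1000000 in
theorem pvA1_keys (WE : List String) (words : List (String × String)) :
    (pvA1 WE words).keys = pvKeys WE words := by
  unfold pvA1 pvKeys
  rw [show ([] : PySem.Set String) = (PySem.Dict.empty : PySem.Dict String (PySem.Dict String Int)).keys from rfl]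
  exact (List.foldl_hom (f := PySem.Dict.keys)
    (g₁ := fun (m : PySem.Dict String (PySem.Dict String Int)) p => (pvTk WE p).foldl (fun m word => m.insert word PySem.Dict.empty) m)
    (g₂ := fun s p => PySem.Set.update s (pvTk WE p))
    (fun m p =>
    (PySem.Dict.keys_foldl_insert (pvTk WE p) (fun _ _ => PySem.Dict.empty) m).symm)).symm

set_option maxHeartbeats 1000000 in
theorem pvA2_keys (WE : List String) (words : List (String × String)) :
    (pvA2 WE words).keys = pvKeys WE words := by
  unfold pvA2
  rw [← List.foldl_hom (f := PySem.Dict.keys)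
    (g₁ := fun (m : PySem.Dict String (PySem.Dict String Int)) p => (pvTk WE p).foldl (fun m word => m.modify word PySem.Dict.empty (fun inner => inner.insert p.1 0)) m)
    (g₂ := fun s p => PySem.Set.update s (pvTk WE p))
    (l := words) (init := pvA1 WE words)
    (fun m p => (PySem.Dict.keys_foldl_modify (pvTk WE p) PySem.Dict.empty
      (fun _ word v => v.insert p.1 0) m).symm)]
  rw [pvA1_keys WE words]
  exact pvStab WE words _ (fun p hp x hx => pvKeys_mem WE words p hp x hx [])

set_option maxHeartbeats 1000000 in
theorem pvA3_keys (WE : List String) (words : List (String × String)) :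
    (pvA3 WE words).keys = pvKeys WE words := by
  unfold pvA3
  rw [← List.foldl_hom (f := PySem.Dict.keys)
    (g₁ := fun (m : PySem.Dict String (PySem.Dict String Int)) p => (pvTk WE p).foldl (fun m word => m.modify word PySem.Dict.empty (fun inner => inner.modify p.1 0 (· + 1))) m)
    (g₂ := fun s p => PySem.Set.update s (pvTk WE p))
    (l := words) (init := pvA2 WE words)
    (fun m p => (PySem.Dict.keys_foldl_modify (pvTk WE p) PySem.Dict.empty
      (fun _ word v => v.modify p.1 0 (· + 1)) m).symm)]
  rw [pvA2_keys WE words]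
  exact pvStab WE words _ (fun p hp x hx => pvKeys_mem WE words p hp x hx [])

set_option maxHeartbeats 1000000 in
theorem pvB_keys (WE : List String) (words : List (String × String)) :
    (pvBd WE words).keys = pvKeys WE words := by
  unfold pvBd
  rw [← List.foldl_hom (f := PySem.Dict.keys)
    (g₁ := fun (m : PySem.Dict String (PySem.Dict String Int)) p => (PySem.Dict.counter (pvTk WE p)).items.foldl
      (fun m q => m.modify q.1 PySem.Dict.empty (fun inner => inner.insert p.1 q.2)) m)
    (g₂ := fun s p => PySem.Set.update s (pvTk WE p))
    (l := words) (init := PySem.Dict.empty)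
    (fun m p => by
      rw [PySem.Dict.keys_foldl_modify_key ((PySem.Dict.counter (pvTk WE p)).items) Prod.fst
        PySem.Dict.empty (fun _ q inner => inner.insert p.1 q.2) m]
      rw [show ((PySem.Dict.counter (pvTk WE p)).items).map Prod.fst
        = (PySem.Dict.counter (pvTk WE p)).keys from rfl]
      rw [PySem.Dict.keys_counter, pvUpdateOfList])]
  rw [show (PySem.Dict.empty : PySem.Dict String (PySem.Dict String Int)).keys = ([] : PySem.Set String) from rfl]
  rfl

theorem pvNodupNest {B : Type} (l : List B)
    (F : PySem.Dict String (PySem.Dict String Int) → B → PySem.Dict String (PySem.Dict String Int))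
    (h : ∀ m x, m.keys.Nodup → (F m x).keys.Nodup)
    (m : PySem.Dict String (PySem.Dict String Int)) (hm : m.keys.Nodup) :
    (l.foldl F m).keys.Nodup := by
  induction l generalizing m with
  | nil => simpa using hm
  | cons a l ih => exact ih _ (h m a hm)

set_option maxHeartbeats 1000000 in
theorem pvA3_nodup (WE : List String) (words : List (String × String)) :
    (pvA3 WE words).keys.Nodup := by
  unfold pvA3 pvA2 pvA1
  apply pvNodupNest _ _ (fun m p hm =>
    PySem.Dict.nodup_keys_foldl_modify_key (pvTk WE p) id PySem.Dict.empty
      (fun _ word v => v.modify p.1 0 (· + 1)) m hm)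
  apply pvNodupNest _ _ (fun m p hm =>
    PySem.Dict.nodup_keys_foldl_modify_key (pvTk WE p) id PySem.Dict.empty
      (fun _ word v => v.insert p.1 0) m hm)
  apply pvNodupNest _ _ (fun m p hm =>
    PySem.Dict.nodup_keys_foldl_insert (pvTk WE p) (fun _ _ => PySem.Dict.empty) m hm)
  exact PySem.Dict.nodup_keys_empty

set_option maxHeartbeats 1000000 in
theorem pvB_nodup (WE : List String) (words : List (String × String)) :
    (pvBd WE words).keys.Nodup := by
  unfold pvBd
  apply pvNodupNest _ _ (fun m p hm =>
    PySem.Dict.nodup_keys_foldl_modify_key ((PySem.Dict.counter (pvTk WE p)).items) Prod.fst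
      PySem.Dict.empty (fun _ q inner => inner.insert p.1 q.2) m hm)
  exact PySem.Dict.nodup_keys_empty

set_option maxHeartbeats 1000000 in
theorem pvA1_getD (WE : List String) (words : List (String × String)) (w : String) :
    (pvA1 WE words).getD w PySem.Dict.empty = PySem.Dict.empty := by
  unfold pvA1
  have hgen : ∀ (m : PySem.Dict String (PySem.Dict String Int)),
      m.getD w PySem.Dict.empty = PySem.Dict.empty →
      (words.foldl (fun m p => (pvTk WE p).foldl (fun m word => m.insert word PySem.Dict.empty) m) m).getD w PySem.Dict.empty = PySem.Dict.empty := by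
    induction words with
    | nil => intro m hm; simpa using hm
    | cons q rest ih =>
      intro m hm
      simp only [List.foldl_cons]
      exact ih _ (pvGetD_foldl_insert_empty _ m w hm)
  exact hgen _ (by simp)

set_option maxHeartbeats 1000000 in
theorem pvA3_getD (WE : List String) (words : List (String × String)) (w : String) :
    (pvA3 WE words).getD w PySem.Dict.empty = pvVA WE words w := by
  have h2 : (pvA2 WE words).getD w PySem.Dict.empty
      = (pvOcc WE words w).foldl (fun v p => v.insert p.1 0) PySem.Dict.empty := by
    unfold pvA2
    rw [← List.foldl_hom (f := fun (m : PySem.Dict String (PySem.Dict String Int)) => m.getD w PySem.Dict.empty)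
      (g₁ := fun m p => (pvTk WE p).foldl (fun m word => m.modify word PySem.Dict.empty (fun inner => inner.insert p.1 0)) m)
      (g₂ := fun a p => (((pvTk WE p).filter (fun x => x == w)).foldl (fun a _ => a.insert p.1 0) a))
      (l := words) (init := pvA1 WE words)
      (fun m p => (pvGetD_foldl_modify (pvTk WE p) id PySem.Dict.empty
        (fun x inner => inner.insert p.1 0) m w).symm)]
    rw [pvA1_getD WE words w]
    exact pvFlattenStep WE words w (fun (v : PySem.Dict String Int) p => v.insert p.1 0) PySem.Dict.empty
  unfold pvA3 pvVA
  rw [← List.foldl_hom (f := fun (m : PySem.Dict String (PySem.Dict String Int)) => m.getD w PySem.Dict.empty)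
    (g₁ := fun m p => (pvTk WE p).foldl (fun m word => m.modify word PySem.Dict.empty (fun inner => inner.modify p.1 0 (· + 1))) m)
    (g₂ := fun a p => (((pvTk WE p).filter (fun x => x == w)).foldl (fun a _ => a.modify p.1 0 (· + 1)) a))
    (l := words) (init := pvA2 WE words)
    (fun m p => (pvGetD_foldl_modify (pvTk WE p) id PySem.Dict.empty
      (fun x inner => inner.modify p.1 0 (· + 1)) m w).symm)]
  rw [h2]
  exact pvFlattenStep WE words w (fun (v : PySem.Dict String Int) p => v.modify p.1 0 (· + 1)) _

-- doc-structure of B's loop, with the tokenizer abstract (keeps unification cheap)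
theorem pvBHom (tkf : (String × String) → List String) (w : String)
    (words : List (String × String)) (m : PySem.Dict String (PySem.Dict String Int)) :
    (words.foldl (fun m p => (PySem.Dict.counter (tkf p)).items.foldl
        (fun m q => m.modify q.1 PySem.Dict.empty (fun inner => inner.insert p.1 q.2)) m) m).getD w PySem.Dict.empty
      = words.foldl (fun a p => if ((tkf p).contains w) = true
          then a.insert p.1 (((tkf p).count w : Int)) else a) (m.getD w PySem.Dict.empty) := by
  induction words generalizing m with
  | nil => rfl
  | cons p rest ih =>
    simp only [List.foldl_cons]
    rw [ih]
    congr 1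
    rw [pvGetD_foldl_modify ((PySem.Dict.counter (tkf p)).items) Prod.fst PySem.Dict.empty
      (fun q inner => inner.insert p.1 q.2) m w]
    rw [pvCounterItemsFilter (tkf p) w]
    by_cases hw : w ∈ tkf p
    · rw [if_pos hw, if_pos (List.elem_eq_true_of_mem hw)]
      rfl
    · have hc : (tkf p).contains w = false := by
        cases hc : (tkf p).contains w
        · rfl
        · exact absurd (List.mem_of_elem_eq_true hc) hw
      rw [if_neg hw, hc]
      rfl

theorem pvB_getD (WE : List String) (words : List (String × String)) (w : String) :
    (pvBd WE words).getD w PySem.Dict.empty = pvVB WE words w := by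
  unfold pvBd pvVB
  refine (pvBHom (pvTk WE) w words PySem.Dict.empty).trans ?_
  rw [PySem.Dict.getD_empty]
  unfold pvDocs
  rw [List.foldl_filter]

set_option maxHeartbeats 1000000 in
theorem pvVA_eq_pvVB (WE : List String) (words : List (String × String)) (w : String)
    (hnd : (words.map Prod.fst).Nodup) : pvVA WE words w = pvVB WE words w := by
  have hdocnd : ((pvDocs WE words w).map Prod.fst).Nodup := by
    have hsub : (pvDocs WE words w).Sublist words := List.filter_sublist
    exact List.Nodup.sublist (hsub.map Prod.fst) hnd
  have hkA : (pvVA WE words w).keys = PySem.Set.ofList ((pvOcc WE words w).map Prod.fst) := by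
    unfold pvVA
    rw [PySem.Dict.keys_foldl_modify_key (pvOcc WE words w) Prod.fst 0
        (fun _ p => (fun v => v + 1)) _]
    rw [PySem.Dict.keys_foldl_insert_key (pvOcc WE words w) Prod.fst (fun _ _ => (0:Int)) _]
    rw [PySem.Dict.keys_empty, PySem.Set.update_nil_left]
    exact pvUpdate_of_subset _ _ (fun x hx => (PySem.Set.mem_ofList _ _).2 hx)
  have hkB : (pvVB WE words w).keys = (pvDocs WE words w).map Prod.fst := by
    unfold pvVB
    rw [PySem.Dict.keys_foldl_insert_key (pvDocs WE words w) Prod.fst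
        (fun _ p => ((pvTk WE p).count w : Int)) _]
    rw [PySem.Dict.keys_empty, PySem.Set.update_nil_left]
    exact PySem.Set.ofList_eq_self_of_nodup _ hdocnd
  apply pvDictExt _ _ 0
  · rw [hkA]; exact PySem.Set.nodup_ofList _
  · rw [hkB]; exact hdocnd
  · rw [hkA, hkB]; exact pvOcc_ofList WE words w hnd
  · intro k hk
    rw [hkA, pvOcc_ofList WE words w hnd] at hk
    rcases List.mem_map.1 hk with ⟨p, hpd, rfl⟩
    have hpw : p ∈ words := List.mem_of_mem_filter hpd
    have hwp : w ∈ pvTk WE p := by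
      have := (List.mem_filter.1 hpd).2
      simpa using this
    have hA : (pvVA WE words w).getD p.1 0 = ((pvTk WE p).count w : Int) := by
      unfold pvVA
      rw [← List.foldl_map (f := Prod.fst)
          (g := fun (v : PySem.Dict String Int) (x : String) => v.modify x 0 (· + 1))]
      rw [PySem.Dict.getD_foldl_modify_add_one]
      rw [pvGetD_foldl_insert_zero _ _ _ (by simp), pvOcc_count WE words w hnd p hpw hwp]
      simp
    have hB : (pvVB WE words w).getD p.1 0 = ((pvTk WE p).count w : Int) := by
      unfold pvVB
      exact pvGetD_foldl_insert_key (pvDocs WE words w) Prod.fst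
        (fun q => ((pvTk WE q).count w : Int)) hdocnd p hpd
    rw [hA, hB]

set_option maxHeartbeats 1000000 in
theorem pvMain (WE : List String) (words : List (String × String))
    (hnd : (words.map Prod.fst).Nodup) : pvA3 WE words = pvBd WE words := by
  apply pvDictExt _ _ PySem.Dict.empty (pvA3_nodup WE words) (pvB_nodup WE words)
    ((pvA3_keys WE words).trans (pvB_keys WE words).symm)
  intro k _
  rw [pvA3_getD WE words k, pvB_getD WE words k, pvVA_eq_pvVB WE words k hnd]

-- ===== VERDICT (by name: the statement is the Claim_ definition above) =====
theorem generateMatrixGeneral_spec : Claim_equal_generateMatrixGeneral := by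
  intro words WE _ hpre
  unfold Spec_generateMatrixGeneral
  rw [pvA_eq, pvB_eq, pvMain WE words hpre]
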